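-- pv_equiv track=rewrite | github.com/BugJackBarron/ZoneNSI.md | site/NSI/Terminale/C08/Alignement_Top_Down_memo.py | align_seq_rec
-- ===== SOURCE A (Python) =====
-- def align_seq_rec(a : str, b : str) :
--     if len(a) == 0 and len(b) == 0 :
--         return ("","", 0)
--     elif len(a) == 0 :
--         return ("", b, len(b))
--     elif len(b) == 0 :
--         return (a, "", len(a))
--     elif a[0] == b[0] :
--         S = align_seq_rec(a[1:], b[1:])
--         return (a[0]+S[0], b[0]+S[1], S[2])
--     else :
--         S1 = align_seq_rec(a, b[1:])
--         S2 = align_seq_rec(a[1:], b)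
--         if S1[2]<=S2[2] :
--             return ("-"+S1[0], b[0]+S1[1], 1+S1[2])
--         else :
--             return (a[0]+S2[0], "-"+S2[1], 1+S2[2])
-- ===== SOURCE B (Python) =====
-- def align_seq_rec(a: str, b: str):
--     # Bottom-up DP over suffixes: row[j] = alignment of (a[i:], b[j:]),
--     # same recurrence and tie-break as the recursive definition.
--     n, m = len(a), len(b)
--     row = [("", b[j:], m - j) for j in range(m)] + [("", "", 0)]
--     for i in range(n - 1, -1, -1):
--         new = [None] * (m + 1)
--         new[m] = (a[i:], "", n - i)
--         for j in range(m - 1, -1, -1):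
--             if a[i] == b[j]:
--                 S = row[j + 1]
--                 new[j] = (a[i] + S[0], b[j] + S[1], S[2])
--             else:
--                 S1, S2 = new[j + 1], row[j]
--                 if S1[2] <= S2[2]:
--                     new[j] = ("-" + S1[0], b[j] + S1[1], 1 + S1[2])
--                 else:
--                     new[j] = (a[i] + S2[0], "-" + S2[1], 1 + S2[2])
--         row = new
--     return row[0]
-- ===== Notes on version B (the rewrite author's own statement) =====
-- stated objective: faster
-- what changed: Replaced the exponential top-down recursion with a bottom-up dynamic-programming table over suffixes (two rolling rows) using the same recurrence and tie-break; intended as asymptotically faster (timing: A timed out at n=16 where B returned, so no ratio could be measured).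
import Mathlib
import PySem

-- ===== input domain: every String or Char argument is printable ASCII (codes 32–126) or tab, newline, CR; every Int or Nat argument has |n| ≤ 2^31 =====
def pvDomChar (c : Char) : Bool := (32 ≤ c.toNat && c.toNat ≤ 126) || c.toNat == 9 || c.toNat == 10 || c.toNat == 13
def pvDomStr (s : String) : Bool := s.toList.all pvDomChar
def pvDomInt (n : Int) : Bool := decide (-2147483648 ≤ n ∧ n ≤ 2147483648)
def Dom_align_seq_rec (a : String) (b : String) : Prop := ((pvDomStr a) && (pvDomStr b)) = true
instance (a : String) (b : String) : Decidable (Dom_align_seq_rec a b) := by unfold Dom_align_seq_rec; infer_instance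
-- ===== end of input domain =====

-- B replaces A's exponential top-down recursion by a bottom-up DP table with the same
-- recurrence and tie-break. Intended as asymptotically faster; a timing run measured A timing out at n=16 where B returned (no clean ratio at a size both finish).

-- ===== PORT A =====
-- A's recursion, on lists of characters (Python strings ported via toList/String.ofList;
-- a[0]/a[1:] on a nonempty string are head/tail).
def alignRecCore : List Char → List Char → List Char × List Char × Int
  | [], [] => ([], [], 0)
  | [], b => ([], b, (b.length : Int))
  | a, [] => (a, [], (a.length : Int))
  | x :: xs, y :: ys =>
    if x = y then
      let S := alignRecCore xs ys
      (x :: S.1, y :: S.2.1, S.2.2)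
    else
      let S1 := alignRecCore (x :: xs) ys
      let S2 := alignRecCore xs (y :: ys)
      if S1.2.2 ≤ S2.2.2 then
        ('-' :: S1.1, y :: S1.2.1, 1 + S1.2.2)
      else
        (x :: S2.1, '-' :: S2.2.1, 1 + S2.2.2)
  termination_by a b => a.length + b.length
  decreasing_by all_goals simp <;> omega

def packAlign (e : List Char × List Char × Int) : String × String × Int :=
  (String.ofList e.1, String.ofList e.2.1, e.2.2)

def align_seq_rec (a : String) (b : String) : String × String × Int :=
  packAlign (alignRecCore a.toList b.toList)

-- ===== PORT B =====
-- entry for (a-suffix, b-suffix): (aligned a, aligned b, cost)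
-- base row: entries for the empty a-suffix against each suffix of b (Source B's initial `row`)
def alignBaseRow : List Char → List (List Char × List Char × Int)
  | [] => [([], [], 0)]
  | y :: ys => ([], y :: ys, (ys.length + 1 : Int)) :: alignBaseRow ys

-- inner j-loop of Source B: build the row for a-suffix x::xs from the row `next` for xs,
-- right to left over the suffixes of bs; e0 is the entry for the empty b-suffix (new[m]).
def alignStepRow (x : Char) (e0 : List Char × List Char × Int) :
    List Char → List (List Char × List Char × Int) → List (List Char × List Char × Int)
  | [], _ => [e0]
  | y :: ys, next =>
    let nt := next.tail
    let rest := alignStepRow x e0 ys nt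
    let cur :=
      if x = y then
        let S := nt.headD ([], [], 0)
        (x :: S.1, y :: S.2.1, S.2.2)
      else
        let S1 := rest.headD ([], [], 0)
        let S2 := next.headD ([], [], 0)
        if S1.2.2 ≤ S2.2.2 then
          ('-' :: S1.1, y :: S1.2.1, 1 + S1.2.2)
        else
          (x :: S2.1, '-' :: S2.2.1, 1 + S2.2.2)
    cur :: rest

-- outer i-loop of Source B (rolling rows), as recursion over a's characters
def alignRows : List Char → List Char → List (List Char × List Char × Int)
  | [], bs => alignBaseRow bs
  | x :: xs, bs => alignStepRow x (x :: xs, [], (xs.length + 1 : Int)) bs (alignRows xs bs)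

def align_seq_rec_alt (a : String) (b : String) : String × String × Int :=
  packAlign ((alignRows a.toList b.toList).headD ([], [], 0))

-- ===== PRECONDITION & SPEC =====
def Spec_align_seq_rec (a : String) (b : String) (out : String × String × Int) : Prop := out = align_seq_rec_alt a b
instance (a : String) (b : String) (out : String × String × Int) : Decidable (Spec_align_seq_rec a b out) := by unfold Spec_align_seq_rec; infer_instance

-- ===== CLAIM (what is proved, stated in full; the proofs are below) =====
def Claim_equal_align_seq_rec : Prop := ∀ (a : String) (b : String), Dom_align_seq_rec a b → Spec_align_seq_rec a b (align_seq_rec a b)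

-- ===== LEMMAS AND PROOFS =====

theorem alignRecCore_nil (s : List Char) : alignRecCore [] s = ([], s, (s.length : Int)) := by
  cases s <;> simp [alignRecCore]

theorem alignBaseRow_eq (bs : List Char) :
    alignBaseRow bs = bs.tails.map (fun s => alignRecCore [] s) := by
  induction bs with
  | nil => simp [alignBaseRow, alignRecCore]
  | cons y ys ih => simp [alignBaseRow, ih, alignRecCore_nil]

theorem tails_map_headD (f : List Char → List Char × List Char × Int) (l : List Char) :
    (l.tails.map f).headD ([], [], 0) = f l := by
  cases l <;> simp

theorem alignStepRow_eq (x : Char) (xs bs : List Char) :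
    alignStepRow x (x :: xs, [], (xs.length + 1 : Int)) bs
        (bs.tails.map (fun s => alignRecCore xs s))
      = bs.tails.map (fun s => alignRecCore (x :: xs) s) := by
  induction bs with
  | nil => simp [alignStepRow, alignRecCore]
  | cons y ys ih =>
    simp only [List.tails_cons, List.map_cons, alignStepRow, List.tail_cons, ih,
      tails_map_headD]
    by_cases hxy : x = y <;>
      simp [alignRecCore, hxy]

theorem alignRows_eq (as bs : List Char) :
    alignRows as bs = bs.tails.map (fun s => alignRecCore as s) := by
  induction as with
  | nil => simp [alignRows, alignBaseRow_eq]
  | cons x xs ih => simp [alignRows, ih, alignStepRow_eq]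

-- ===== VERDICT (by name: the statement is the Claim_ definition above) =====
theorem align_seq_rec_spec : Claim_equal_align_seq_rec := by
  intro a b _
  unfold Spec_align_seq_rec align_seq_rec align_seq_rec_alt
  rw [alignRows_eq, tails_map_headD]
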